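-- pv_equiv track=rewrite | github.com/smargetic/CSE_537-Artificial_Intelligence | Homework3/q2_classifier.py | overallErrorTest
-- ===== SOURCE A (Python) =====
-- def overallErrorTest(test_data, answerList):
--     dicCategory = {"TOTAL ACTUAL SPAM": 0, "TOTAL ACTUALLY NOT SPAM": 0}
--     dicWrong = {"SPAM": 0, "NOT SPAM": 0, "TOTAL WRONG": 0}
--     for i in range(0,len(test_data)):
--         if(test_data[i][1]=="spam"):
--             dicCategory["TOTAL ACTUAL SPAM"] = dicCategory["TOTAL ACTUAL SPAM"] + 1
--         else:
--             dicCategory["TOTAL ACTUALLY NOT SPAM"] = dicCategory["TOTAL ACTUALLY NOT SPAM"] + 1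
--
--         if(test_data[i][1]!=answerList[i]):
--             dicWrong["TOTAL WRONG"] = dicWrong["TOTAL WRONG"] +1
--             if(test_data[i][1]=="spam"):
--                 dicWrong["SPAM"] = dicWrong["SPAM"] +1
--             else:
--                 dicWrong["NOT SPAM"] = dicWrong["NOT SPAM"] +1
--     dicWrong["TOTAL"] = len(test_data)
--     return dicWrong, dicCategory
-- ===== SOURCE B (Python) =====
-- def overallErrorTest(test_data, answerList):
--     n = len(test_data)
--     spam_total = sum(1 for r in test_data if r[1] == "spam")
--     wrong_spam = sum(1 for r, a in zip(test_data, answerList)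
--                      if r[1] == "spam" and r[1] != a)
--     wrong_not = sum(1 for r, a in zip(test_data, answerList)
--                     if r[1] != "spam" and r[1] != a)
--     dicWrong = {"SPAM": wrong_spam, "NOT SPAM": wrong_not,
--                 "TOTAL WRONG": wrong_spam + wrong_not, "TOTAL": n}
--     dicCategory = {"TOTAL ACTUAL SPAM": spam_total,
--                    "TOTAL ACTUALLY NOT SPAM": n - spam_total}
--     return dicWrong, dicCategory
-- ===== Notes on version B (the rewrite author's own statement) =====
-- stated objective: simpler
-- what changed: Replaces the single fused index loop that mutates two dicts with independent one-line counting passes (zip-based comprehension sums) and derives the non-spam total and TOTAL WRONG by subtraction/addition, assembling both dicts as literals.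
import Mathlib
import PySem

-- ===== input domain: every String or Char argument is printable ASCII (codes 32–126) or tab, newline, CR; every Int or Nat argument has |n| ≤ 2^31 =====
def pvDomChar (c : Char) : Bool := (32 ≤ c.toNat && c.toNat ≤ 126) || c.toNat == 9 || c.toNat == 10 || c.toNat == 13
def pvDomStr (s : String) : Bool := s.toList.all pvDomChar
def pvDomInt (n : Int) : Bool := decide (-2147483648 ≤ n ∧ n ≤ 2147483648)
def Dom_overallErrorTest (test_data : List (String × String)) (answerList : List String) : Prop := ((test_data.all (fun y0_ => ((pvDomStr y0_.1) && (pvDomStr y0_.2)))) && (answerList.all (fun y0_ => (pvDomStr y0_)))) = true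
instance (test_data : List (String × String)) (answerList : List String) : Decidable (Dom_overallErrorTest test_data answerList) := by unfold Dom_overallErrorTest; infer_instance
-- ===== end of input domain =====

-- B replaces A's fused index loop over two mutated dicts by independent counting passes
-- (zip-based sums) plus subtraction/addition, assembling both dicts as literals; objective: simpler.

-- ===== PORT A =====
-- the body of A's 'for i in range(0, len(test_data))' loop; state s = (dicWrong, dicCategory)
def pvStepA (test_data : List (String × String)) (answerList : List String)
    (s : PySem.Dict String Int × PySem.Dict String Int) (i : Int) :
    PySem.Dict String Int × PySem.Dict String Int :=
  -- test_data[i]; i is always in range, the default is never read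
  let row := PySem.List.pyGetD test_data i ("", "")
  let dicCategory :=
    if row.2 == "spam" then
      s.2.insert "TOTAL ACTUAL SPAM" (s.2.getD "TOTAL ACTUAL SPAM" 0 + 1)
    else
      s.2.insert "TOTAL ACTUALLY NOT SPAM" (s.2.getD "TOTAL ACTUALLY NOT SPAM" 0 + 1)
  let dicWrong :=
    -- answerList[i]: out of range = Python IndexError, excluded by Pre_
    if row.2 != PySem.List.pyGetD answerList i "" then
      let dw := s.1.insert "TOTAL WRONG" (s.1.getD "TOTAL WRONG" 0 + 1)
      if row.2 == "spam" then dw.insert "SPAM" (dw.getD "SPAM" 0 + 1)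
      else dw.insert "NOT SPAM" (dw.getD "NOT SPAM" 0 + 1)
    else s.1
  (dicWrong, dicCategory)

def overallErrorTest (test_data : List (String × String)) (answerList : List String) :
    (List (String × Int)) × (List (String × Int)) :=
  let dicCategory : PySem.Dict String Int :=
    (PySem.Dict.empty.insert "TOTAL ACTUAL SPAM" 0).insert "TOTAL ACTUALLY NOT SPAM" 0
  let dicWrong : PySem.Dict String Int :=
    ((PySem.Dict.empty.insert "SPAM" 0).insert "NOT SPAM" 0).insert "TOTAL WRONG" 0
  let st := (PySem.List.pyRange 0 (test_data.length : Int) 1).foldl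
    (pvStepA test_data answerList) (dicWrong, dicCategory)
  ((st.1.insert "TOTAL" (test_data.length : Int)).items, st.2.items)

-- ===== PORT B =====
def overallErrorTest_alt (test_data : List (String × String)) (answerList : List String) :
    (List (String × Int)) × (List (String × Int)) :=
  let n : Int := test_data.length
  let spam_total : Int := test_data.countP (fun r => r.2 == "spam")
  let wrong_spam : Int :=
    (test_data.zip answerList).countP (fun p => p.1.2 == "spam" && p.1.2 != p.2)
  let wrong_not : Int :=
    (test_data.zip answerList).countP (fun p => p.1.2 != "spam" && p.1.2 != p.2)
  ([("SPAM", wrong_spam), ("NOT SPAM", wrong_not),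
    ("TOTAL WRONG", wrong_spam + wrong_not), ("TOTAL", n)],
   [("TOTAL ACTUAL SPAM", spam_total), ("TOTAL ACTUALLY NOT SPAM", n - spam_total)])

-- ===== PRECONDITION & SPEC =====
-- A indexes answerList[i] for every i < len(test_data); a shorter answerList raises IndexError.
def Pre_overallErrorTest (test_data : List (String × String)) (answerList : List String) : Prop :=
  test_data.length ≤ answerList.length
instance (test_data : List (String × String)) (answerList : List String) : Decidable (Pre_overallErrorTest test_data answerList) := by unfold Pre_overallErrorTest; infer_instance
def pvWitness_overallErrorTest : (List (String × String)) × List String :=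
  ([("a", "spam"), ("b", "ham")], ["spam", "spam"])

def Spec_overallErrorTest (test_data : List (String × String)) (answerList : List String) (out : (List (String × Int)) × (List (String × Int))) : Prop := out = overallErrorTest_alt test_data answerList
instance (test_data : List (String × String)) (answerList : List String) (out : (List (String × Int)) × (List (String × Int))) : Decidable (Spec_overallErrorTest test_data answerList out) := by unfold Spec_overallErrorTest; infer_instance

-- ===== CLAIM (what is proved, stated in full; the proofs are below) =====
def Claim_equal_overallErrorTest : Prop := ∀ (test_data : List (String × String)) (answerList : List String), Dom_overallErrorTest test_data answerList → Pre_overallErrorTest test_data answerList → Spec_overallErrorTest test_data answerList (overallErrorTest test_data answerList)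

-- ===== LEMMAS AND PROOFS =====

theorem pv_zip_append_singleton (x : String × String) :
    ∀ (td : List (String × String)) (al : List String), td.length < al.length →
    (td ++ [x]).zip al = td.zip al ++ [(x, al.getD td.length "")] := by
  intro td
  induction td with
  | nil => intro al h; cases al with
    | nil => simp at h
    | cons a as => simp [List.zip]
  | cons t ts ih =>
    intro al h
    cases al with
    | nil => simp at h
    | cons a as =>
      simp only [List.cons_append, List.zip_cons_cons, List.length_cons] at *
      rw [ih as (by omega)]
      simp

set_option maxHeartbeats 1000000 in
theorem pv_loopA (al : List String) :
    ∀ (td : List (String × String)), td.length ≤ al.length →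
    ∀ (a b c d e : Int),
    (PySem.List.pyRange 0 (td.length : Int) 1).foldl (pvStepA td al)
      (PySem.Dict.mk [("SPAM", a), ("NOT SPAM", b), ("TOTAL WRONG", c)],
       PySem.Dict.mk [("TOTAL ACTUAL SPAM", d), ("TOTAL ACTUALLY NOT SPAM", e)])
    = (PySem.Dict.mk
        [("SPAM", a + ((td.zip al).countP (fun p => p.1.2 == "spam" && p.1.2 != p.2) : Int)),
         ("NOT SPAM", b + ((td.zip al).countP (fun p => p.1.2 != "spam" && p.1.2 != p.2) : Int)),
         ("TOTAL WRONG", c + ((td.zip al).countP (fun p => p.1.2 == "spam" && p.1.2 != p.2) : Int)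
            + ((td.zip al).countP (fun p => p.1.2 != "spam" && p.1.2 != p.2) : Int))],
       PySem.Dict.mk
        [("TOTAL ACTUAL SPAM", d + (td.countP (fun r => r.2 == "spam") : Int)),
         ("TOTAL ACTUALLY NOT SPAM", e + (td.countP (fun r => !(r.2 == "spam")) : Int))]) := by
  intro td
  induction td using List.reverseRecOn with
  | nil => intro h a b c d e; simp [PySem.List.pyRange_one_eq_nil]
  | append_singleton ts x ih =>
    intro h a b c d e
    have hlen : ts.length < al.length := by simp at h; omega
    have hrange : (PySem.List.pyRange 0 ((ts ++ [x]).length : Int) 1)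
        = PySem.List.pyRange 0 (ts.length : Int) 1 ++ [(ts.length : Int)] := by
      have : ((ts ++ [x]).length : Int) = (ts.length : Int) + 1 := by simp
      rw [this, PySem.List.pyRange_one_succ_right (by positivity)]
    rw [hrange, List.foldl_append]
    have hcongr : (PySem.List.pyRange 0 (ts.length : Int) 1).foldl (pvStepA (ts ++ [x]) al)
        (PySem.Dict.mk [("SPAM", a), ("NOT SPAM", b), ("TOTAL WRONG", c)],
         PySem.Dict.mk [("TOTAL ACTUAL SPAM", d), ("TOTAL ACTUALLY NOT SPAM", e)])
        = (PySem.List.pyRange 0 (ts.length : Int) 1).foldl (pvStepA ts al)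
        (PySem.Dict.mk [("SPAM", a), ("NOT SPAM", b), ("TOTAL WRONG", c)],
         PySem.Dict.mk [("TOTAL ACTUAL SPAM", d), ("TOTAL ACTUALLY NOT SPAM", e)]) := by
      apply PySem.List.foldl_congr_mem
      intro acc i hi
      rw [PySem.List.mem_pyRange_one] at hi
      have hget : PySem.List.pyGetD (ts ++ [x]) i ("", "") = PySem.List.pyGetD ts i ("", "") := by
        have h1 : PySem.List.pyGetD (ts ++ [x]) i ("", "") = (ts ++ [x]).getD i.toNat ("", "") := by
          conv_lhs => rw [← Int.toNat_of_nonneg hi.1]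
          rw [PySem.List.pyGetD_natCast]
        have h2 : PySem.List.pyGetD ts i ("", "") = ts.getD i.toNat ("", "") := by
          conv_lhs => rw [← Int.toNat_of_nonneg hi.1]
          rw [PySem.List.pyGetD_natCast]
        have hlt : i.toNat < ts.length := by omega
        rw [h1, h2, List.getD_eq_getElem?_getD, List.getD_eq_getElem?_getD,
          List.getElem?_append_left hlt]
      simp only [pvStepA, hget]
    rw [hcongr, ih (by omega) a b c d e]
    -- the final iteration
    have hx : PySem.List.pyGetD (ts ++ [x]) (ts.length : Int) ("", "") = x := by
      rw [PySem.List.pyGetD_natCast, List.getD_eq_getElem?_getD]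
      simp
    have hy : PySem.List.pyGetD al (ts.length : Int) "" = al.getD ts.length "" := by
      rw [PySem.List.pyGetD_natCast]
    rw [pv_zip_append_singleton x ts al hlen]
    simp only [List.foldl_cons, List.foldl_nil, pvStepA, hx, hy,
      List.countP_append, List.countP_cons, List.countP_nil]
    by_cases hs : x.2 == "spam" <;>
      by_cases hne : x.2 = al[ts.length]?.getD "" <;>
        simp [hs, hne, PySem.Dict.insert, PySem.Dict.getD, PySem.Dict.get?,
          Prod.ext_iff, PySem.Dict.ext_iff] <;>
        (try simp_all) <;> (try push_cast) <;> omega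

-- ===== VERDICT (by name: the statement is the Claim_ definition above) =====
theorem overallErrorTest_spec : Claim_equal_overallErrorTest := by
  intro td al _ hpre
  unfold Spec_overallErrorTest overallErrorTest overallErrorTest_alt
  have hinit :
      (((PySem.Dict.empty.insert "SPAM" (0:Int)).insert "NOT SPAM" 0).insert "TOTAL WRONG" 0,
       (PySem.Dict.empty.insert "TOTAL ACTUAL SPAM" (0:Int)).insert "TOTAL ACTUALLY NOT SPAM" 0)
      = ((PySem.Dict.mk [("SPAM", (0:Int)), ("NOT SPAM", 0), ("TOTAL WRONG", 0)]),
         (PySem.Dict.mk [("TOTAL ACTUAL SPAM", (0:Int)), ("TOTAL ACTUALLY NOT SPAM", 0)])) := by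
    decide
  simp only [hinit]
  rw [pv_loopA al td hpre 0 0 0 0 0]
  have hsplit : (td.countP (fun r => !(r.2 == "spam")) : Int)
      = (td.length : Int) - (td.countP (fun r => r.2 == "spam") : Int) := by
    have := List.length_eq_countP_add_countP (fun r : String × String => r.2 == "spam") (l := td)
    simp only [decide_not, Bool.decide_eq_true] at this
    omega
  simp [PySem.Dict.insert, PySem.Dict.contains, hsplit]
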